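-- pv_equiv track=rewrite | github.com/juvelop17/problem_solving | Codeforces/#687_DIV2/B.py | solution
-- ===== SOURCE A (Python) =====
-- def solution(n,k,clist):
--     total_day = 10**5
--     color_candi = set()
--     for i in clist:
--         if i not in color_candi:
--             color_candi.add(i)
--
--     for cur_color in color_candi:
--         i = 0
--         cnt = 0
--         while i < len(clist):
--             if clist[i] == cur_color:
--                 i += 1
--             else:
--                 i += k
--                 cnt += 1
--         if cnt < total_day:
--             total_day = cnt
--
--     return total_day
-- ===== SOURCE B (Python) =====
-- def solution(n, k, clist):
--     m = len(clist)
--     best = 10 ** 5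
--     for c in set(clist):
--         dp = [0] * (m + 1)
--         for i in range(m - 1, -1, -1):
--             if clist[i] == c:
--                 dp[i] = dp[i + 1]
--             else:
--                 dp[i] = 1 + (dp[i + k] if i + k < m else 0)
--         if dp[0] < best:
--             best = dp[0]
--     return best
-- ===== Notes on version B (the rewrite author's own statement) =====
-- stated objective: alternative
-- what changed: Replaces A's per-color forward while-loop simulation (pointer i walking the array) by a per-color right-to-left dynamic-programming table dp[i] = jumps needed when starting at position i, read off at dp[0].
import Mathlib
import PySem

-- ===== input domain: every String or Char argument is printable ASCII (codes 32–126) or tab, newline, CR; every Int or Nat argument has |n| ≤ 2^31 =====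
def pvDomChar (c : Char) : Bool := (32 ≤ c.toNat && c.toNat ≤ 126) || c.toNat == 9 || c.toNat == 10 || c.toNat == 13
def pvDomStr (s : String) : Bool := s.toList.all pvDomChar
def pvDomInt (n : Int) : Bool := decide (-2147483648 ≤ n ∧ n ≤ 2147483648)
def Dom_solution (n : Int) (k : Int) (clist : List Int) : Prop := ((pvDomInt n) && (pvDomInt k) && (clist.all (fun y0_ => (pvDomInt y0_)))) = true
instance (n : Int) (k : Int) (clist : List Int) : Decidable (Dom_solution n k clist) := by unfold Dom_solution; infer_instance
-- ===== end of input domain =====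

-- B replaces A's per-color forward while-loop simulation by a per-color right-to-left DP table
-- (alternative decomposition, not claimed faster).

-- ===== PORT A =====
-- the 'while i < len(clist)' loop of A; fuel bounds the iterations (inside Pre_ the loop
-- terminates within clist.length + 1 steps, so the fuel is never exhausted there)
def loopA (clist : List Int) (k : Int) (c : Int) : Nat → Int → Int → Int
  | 0, _, cnt => cnt
  | fuel+1, i, cnt =>
    if i < (clist.length : Int) then
      if PySem.List.pyGetD clist i 0 = c then loopA clist k c fuel (i + 1) cnt
      else loopA clist k c fuel (i + k) (cnt + 1)
    else cnt

def solution (n : Int) (k : Int) (clist : List Int) : Int :=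
  let color_candi : PySem.Set Int :=
    clist.foldl (fun s i => if PySem.Set.contains s i then s else PySem.Set.add s i) PySem.Set.empty
  color_candi.foldl (fun total_day cur_color =>
    let cnt := loopA clist k cur_color (clist.length + 1) 0 0
    if cnt < total_day then cnt else total_day) ((10 : Int) ^ 5)

-- ===== PORT B =====
-- the 'for i in range(m-1, -1, -1)' fill of Source B: t is the number of indices still to process,
-- so index i = t - 1 is written next (descending order, exactly as the Python range)
def dpFill (clist : List Int) (k : Int) (c : Int) (m : Int) : Nat → List Int → List Int
  | 0, dp => dp
  | t+1, dp =>
    let i : Int := (t : Int)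
    let v : Int :=
      if PySem.List.pyGetD clist i 0 = c then PySem.List.pyGetD dp (i + 1) 0
      else 1 + (if i + k < m then PySem.List.pyGetD dp (i + k) 0 else 0)
    dpFill clist k c m t (PySem.List.pySetD dp i v)

def solution_alt (n : Int) (k : Int) (clist : List Int) : Int :=
  let m : Int := clist.length
  let colors : PySem.Set Int := PySem.Set.ofList clist
  colors.foldl (fun best c =>
    let dp := dpFill clist k c m clist.length (List.replicate (clist.length + 1) 0)
    if PySem.List.pyGetD dp 0 0 < best then PySem.List.pyGetD dp 0 0 else best) ((10 : Int) ^ 5)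

-- ===== PRECONDITION & SPEC =====
-- Pre_ excludes exactly the inputs on which A diverges: when k ≤ 0 and some element of clist
-- differs from another, A's while loop fails to advance past the first mismatch.
def Pre_solution (n : Int) (k : Int) (clist : List Int) : Prop :=
  1 ≤ k ∨ ∀ x ∈ clist, ∀ y ∈ clist, x = y
instance (n : Int) (k : Int) (clist : List Int) : Decidable (Pre_solution n k clist) := by
  unfold Pre_solution; infer_instance

def pvWitness_solution : Int × Int × List Int := (4, 2, [1, 2, 1, 2])

def Spec_solution (n : Int) (k : Int) (clist : List Int) (out : Int) : Prop := out = solution_alt n k clist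
instance (n : Int) (k : Int) (clist : List Int) (out : Int) : Decidable (Spec_solution n k clist out) := by unfold Spec_solution; infer_instance

-- ===== CLAIM (what is proved, stated in full; the proofs are below) =====
def Claim_equal_solution : Prop := ∀ (n : Int) (k : Int) (clist : List Int), Dom_solution n k clist → Pre_solution n k clist → Spec_solution n k clist (solution n k clist)

-- ===== LEMMAS AND PROOFS =====

-- the mathematical walk count: number of mismatch jumps walking from index i
def W (clist : List Int) (k' : Nat) (c : Int) (i : Nat) : Int :=
  if h : i < clist.length then
    if clist[i] = c then W clist k' c (i + 1) else W clist k' c (i + max k' 1) + 1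
  else 0
termination_by clist.length - i
decreasing_by all_goals omega

theorem W_stop (clist : List Int) (k' : Nat) (c : Int) (i : Nat) (h : ¬ i < clist.length) :
    W clist k' c i = 0 := by rw [W]; simp [h]

theorem loopA_eq_W (clist : List Int) (k c : Int) (hk : 1 ≤ k) :
    ∀ (fuel : Nat) (iN : Nat) (cnt : Int), clist.length - iN ≤ fuel →
      loopA clist k c fuel (iN : Int) cnt = cnt + W clist k.toNat c iN := by
  intro fuel
  induction fuel with
  | zero =>
    intro iN cnt hf
    have h : ¬ iN < clist.length := by omega
    rw [loopA, W_stop clist _ c iN h]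
    simp
  | succ fuel ih =>
    intro iN cnt hf
    by_cases h : iN < clist.length
    · rw [loopA]
      rw [if_pos (by exact_mod_cast h)]
      have hget : PySem.List.pyGetD clist (iN : Int) 0 = clist[iN] := by
        simp [PySem.List.pyGetD_natCast, List.getD_eq_getElem?_getD, List.getElem?_eq_getElem h]
      rw [hget]
      by_cases hc : clist[iN] = c
      · rw [if_pos hc]
        have : ((iN : Int) + 1) = ((iN + 1 : Nat) : Int) := by push_cast; ring
        rw [this, ih (iN + 1) cnt (by omega)]
        conv_rhs => rw [W]
        rw [dif_pos h, if_pos hc]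
      · rw [if_neg hc]
        have hkN : 1 ≤ k.toNat := by omega
        have : ((iN : Int) + k) = ((iN + k.toNat : Nat) : Int) := by
          push_cast; omega
        rw [this, ih (iN + k.toNat) (cnt + 1) (by omega)]
        conv_rhs => rw [W]
        rw [dif_pos h, if_neg hc]
        have : max k.toNat 1 = k.toNat := by omega
        rw [this]; ring
    · rw [loopA, if_neg (by exact_mod_cast h), W_stop clist _ c iN h]
      omega

theorem dpFill_eq_W (clist : List Int) (k c : Int) (hk : 1 ≤ k) :
    ∀ (t : Nat) (dp : List Int), t ≤ clist.length → dp.length = clist.length + 1 →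
      (∀ j : Nat, t ≤ j → j ≤ clist.length → PySem.List.pyGetD dp (j : Int) 0 = W clist k.toNat c j) →
      ∀ j : Nat, j ≤ clist.length →
        PySem.List.pyGetD (dpFill clist k c (clist.length : Int) t dp) (j : Int) 0 = W clist k.toNat c j := by
  intro t
  induction t with
  | zero =>
    intro dp _ _ hinv j hj
    rw [dpFill]
    exact hinv j (by omega) hj
  | succ t ih =>
    intro dp ht hlen hinv j hj
    rw [dpFill]
    have htlt : t < clist.length := by omega
    have htdp : t < dp.length := by omega
    -- the value written at index t is W t
    have hget : PySem.List.pyGetD clist (t : Int) 0 = clist[t] := by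
      simp [PySem.List.pyGetD_natCast, List.getD_eq_getElem?_getD, List.getElem?_eq_getElem htlt]
    have hv :
        (if PySem.List.pyGetD clist (t : Int) 0 = c then PySem.List.pyGetD dp ((t : Int) + 1) 0
         else 1 + (if (t : Int) + k < (clist.length : Int) then PySem.List.pyGetD dp ((t : Int) + k) 0 else 0))
        = W clist k.toNat c t := by
      rw [hget, W, dif_pos htlt]
      by_cases hc : clist[t] = c
      · rw [if_pos hc, if_pos hc]
        have : ((t : Int) + 1) = ((t + 1 : Nat) : Int) := by push_cast; ring
        rw [this, hinv (t + 1) (by omega) (by omega)]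
      · rw [if_neg hc, if_neg hc]
        have hkN : 1 ≤ k.toNat := by omega
        have hmax : max k.toNat 1 = k.toNat := by omega
        rw [hmax]
        have hik : ((t : Int) + k) = ((t + k.toNat : Nat) : Int) := by push_cast; omega
        by_cases hlt : t + k.toNat < clist.length
        · rw [if_pos (by push_cast; omega), hik,
            hinv (t + k.toNat) (by omega) (by omega)]
          ring
        · rw [if_neg (by push_cast; omega), W_stop clist _ c _ hlt]
          ring
    rw [hv]
    apply ih _ (by omega)
    · simp [hlen]
    · intro j' hj1 hj2
      rw [PySem.List.pySetD_natCast]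
      by_cases hjt : j' = t
      · subst hjt
        simp [PySem.List.pyGetD_natCast, List.getD_eq_getElem?_getD, htdp]
      · have : (dp.set t (W clist k.toNat c t)).getD j' 0 = dp.getD j' 0 := by
          simp [List.getD_eq_getElem?_getD, List.getElem?_set_ne (by omega : t ≠ j')]
        rw [PySem.List.pyGetD_natCast, this, ← PySem.List.pyGetD_natCast]
        exact hinv j' (by omega) hj2
    · exact hj

-- uniform lists: every visited element matches, so the walk makes no jumps
theorem loopA_uniform (clist : List Int) (k c : Int) (hu : ∀ x ∈ clist, x = c) :
    ∀ (fuel : Nat) (iN : Nat) (cnt : Int), clist.length - iN ≤ fuel →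
      loopA clist k c fuel (iN : Int) cnt = cnt := by
  intro fuel
  induction fuel with
  | zero =>
    intro iN cnt hf
    rw [loopA]
  | succ fuel ih =>
    intro iN cnt hf
    by_cases h : iN < clist.length
    · rw [loopA, if_pos (by exact_mod_cast h)]
      have hget : PySem.List.pyGetD clist (iN : Int) 0 = clist[iN] := by
        simp [PySem.List.pyGetD_natCast, List.getD_eq_getElem?_getD, List.getElem?_eq_getElem h]
      rw [hget, if_pos (hu _ (List.getElem_mem h))]
      have : ((iN : Int) + 1) = ((iN + 1 : Nat) : Int) := by push_cast; ring
      rw [this, ih (iN + 1) cnt (by omega)]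
    · rw [loopA, if_neg (by exact_mod_cast h)]

theorem dpFill_uniform (clist : List Int) (k c : Int) (hu : ∀ x ∈ clist, x = c) :
    ∀ (t : Nat) (dp : List Int), t ≤ clist.length → dp.length = clist.length + 1 →
      (∀ j : Nat, t ≤ j → j ≤ clist.length → PySem.List.pyGetD dp (j : Int) 0 = 0) →
      ∀ j : Nat, j ≤ clist.length →
        PySem.List.pyGetD (dpFill clist k c (clist.length : Int) t dp) (j : Int) 0 = 0 := by
  intro t
  induction t with
  | zero =>
    intro dp _ _ hinv j hj
    rw [dpFill]
    exact hinv j (by omega) hj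
  | succ t ih =>
    intro dp ht hlen hinv j hj
    rw [dpFill]
    have htlt : t < clist.length := by omega
    have htdp : t < dp.length := by omega
    have hget : PySem.List.pyGetD clist (t : Int) 0 = clist[t] := by
      simp [PySem.List.pyGetD_natCast, List.getD_eq_getElem?_getD, List.getElem?_eq_getElem htlt]
    have hv :
        (if PySem.List.pyGetD clist (t : Int) 0 = c then PySem.List.pyGetD dp ((t : Int) + 1) 0
         else 1 + (if (t : Int) + k < (clist.length : Int) then PySem.List.pyGetD dp ((t : Int) + k) 0 else 0))
        = 0 := by
      rw [hget, if_pos (hu _ (List.getElem_mem htlt))]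
      have : ((t : Int) + 1) = ((t + 1 : Nat) : Int) := by push_cast; ring
      rw [this, hinv (t + 1) (by omega) (by omega)]
    rw [hv]
    apply ih _ (by omega)
    · simp [hlen]
    · intro j' hj1 hj2
      rw [PySem.List.pySetD_natCast]
      by_cases hjt : j' = t
      · subst hjt
        simp [PySem.List.pyGetD_natCast, List.getD_eq_getElem?_getD, htdp]
      · have : (dp.set t 0).getD j' 0 = dp.getD j' 0 := by
          simp [List.getD_eq_getElem?_getD, List.getElem?_set_ne (by omega : t ≠ j')]
        rw [PySem.List.pyGetD_natCast, this, ← PySem.List.pyGetD_natCast]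
        exact hinv j' (by omega) hj2
    · exact hj

theorem replicate_inv (m : Nat) :
    ∀ j : Nat, m ≤ j → j ≤ m → PySem.List.pyGetD (List.replicate (m + 1) (0 : Int)) (j : Int) 0 = 0 := by
  intro j h1 h2
  simp [PySem.List.pyGetD_natCast, List.getD_eq_getElem?_getD, h2]

-- per-color agreement of the two inner computations
theorem cnt_eq (clist : List Int) (k c : Int)
    (hpre : 1 ≤ k ∨ ∀ x ∈ clist, ∀ y ∈ clist, x = y) (hc : c ∈ clist) :
    loopA clist k c (clist.length + 1) 0 0 =
      PySem.List.pyGetD (dpFill clist k c (clist.length : Int) clist.length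
        (List.replicate (clist.length + 1) 0)) 0 0 := by
  have h0 : ((0 : Nat) : Int) = (0 : Int) := by norm_num
  rcases hpre with hk | hu
  · have hA := loopA_eq_W clist k c hk (clist.length + 1) 0 0 (by omega)
    have hB := dpFill_eq_W clist k c hk clist.length (List.replicate (clist.length + 1) 0)
      (by omega) (by simp)
      (by intro j h1 h2
          have hj : j = clist.length := by omega
          subst hj
          rw [W_stop clist _ c _ (by omega)]
          exact replicate_inv clist.length clist.length (by omega) (by omega))
      0 (by omega)
    rw [h0] at hA hB
    rw [hA, hB]
    ring
  · have hu' : ∀ x ∈ clist, x = c := fun x hx => hu x hx c hc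
    have hA := loopA_uniform clist k c hu' (clist.length + 1) 0 0 (by omega)
    have hB := dpFill_uniform clist k c hu' clist.length (List.replicate (clist.length + 1) 0)
      (by omega) (by simp) (replicate_inv clist.length) 0 (by omega)
    rw [h0] at hA hB
    rw [hA, hB]

-- A's hand-rolled set construction is exactly set(clist)
theorem colors_eq (clist : List Int) :
    clist.foldl (fun s i => if PySem.Set.contains s i then s else PySem.Set.add s i) PySem.Set.empty
      = PySem.Set.ofList clist := by
  rw [PySem.Set.ofList_eq_foldl]
  apply PySem.List.foldl_congr_mem
  intro s x _
  by_cases h : PySem.Set.contains s x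
  · rw [if_pos h]
    unfold PySem.Set.add
    rw [if_pos h]
  · rw [if_neg h]

-- ===== VERDICT (by name: the statement is the Claim_ definition above) =====
theorem solution_spec : Claim_equal_solution := by
  intro n k clist _ hpre
  unfold Spec_solution solution solution_alt
  rw [colors_eq]
  apply PySem.List.foldl_congr_mem
  intro total c hcmem
  have hc : c ∈ clist := (PySem.Set.mem_ofList _ _).mp hcmem
  rw [cnt_eq clist k c hpre hc]
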